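-- pv_equiv track=rewrite | github.com/dudamarlena/pyc_source | pycfiles/NovalIDE-1.1.8-py3.5/datetimeparser.cpython-35.py | _getDayFirstAndYearFirst
-- ===== SOURCE A (Python) =====
-- def _getDayFirstAndYearFirst(formatstr):
--     dayFirst = False
--     yearFirst = False
--     gotYear = False
--     gotMonth = False
--     gotDay = False
--     if formatstr == None:
--         formatstr = ''
--     for c in formatstr:
--         if c.lower() == 'y':
--             if gotYear:
--                 pass
--             else:
--                 if not gotDay and not gotMonth:
--                     yearFirst = True
--                 gotYear = True
--         else:
--             if c.lower() == 'm':
--                 if gotMonth: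
--                     pass
--                 else:
--                     if not gotDay:
--                         dayFirst = False
--                     gotMonth = True
--             elif c.lower() == 'd':
--                 if gotDay:
--                     pass
--                 else:
--                     if not gotMonth:
--                         dayFirst = True
--                     gotDay = True
--
--     return (
--      dayFirst, yearFirst)
-- ===== SOURCE B (Python) =====
-- def _getDayFirstAndYearFirst(formatstr):
--     s = ('' if formatstr is None else formatstr).lower()
--     py, pm, pd = s.find('y'), s.find('m'), s.find('d')
--     yearFirst = py != -1 and (pm == -1 or py < pm) and (pd == -1 or py < pd)
--     dayFirst = pd != -1 and (pm == -1 or pd < pm)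
--     return (dayFirst, yearFirst)
-- ===== Notes on version B (the rewrite author's own statement) =====
-- stated objective: simpler
-- what changed: Replaced the per-character five-flag state machine with one lowercasing pass plus three str.find first-occurrence lookups and position comparisons (yearFirst = 'y' strictly first, dayFirst = 'd' before 'm').
import Mathlib
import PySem

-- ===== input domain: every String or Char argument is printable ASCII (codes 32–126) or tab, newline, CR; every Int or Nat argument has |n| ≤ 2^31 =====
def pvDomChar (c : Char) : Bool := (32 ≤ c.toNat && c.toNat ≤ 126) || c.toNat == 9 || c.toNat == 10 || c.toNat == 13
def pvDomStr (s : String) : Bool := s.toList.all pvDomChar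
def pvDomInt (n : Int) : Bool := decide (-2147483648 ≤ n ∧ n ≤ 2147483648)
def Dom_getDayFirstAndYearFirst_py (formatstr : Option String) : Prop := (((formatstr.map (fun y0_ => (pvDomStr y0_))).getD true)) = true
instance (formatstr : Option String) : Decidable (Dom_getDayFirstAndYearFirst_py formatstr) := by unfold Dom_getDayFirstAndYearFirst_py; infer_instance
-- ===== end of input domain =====

-- B replaces A's stateful first-hit flag machine by three str.find position lookups and comparisons (objective: simpler).

-- ===== PORT A =====
-- state = (dayFirst, yearFirst, gotYear, gotMonth, gotDay), exactly A's five locals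
def pvStepA : Bool × Bool × Bool × Bool × Bool → Char → Bool × Bool × Bool × Bool × Bool
  | st@(dayFirst, yearFirst, gotYear, gotMonth, gotDay), c =>
  if PySem.Chars.lowerChar c = 'y' then
    if gotYear then st
    else
      let yearFirst := if !gotDay && !gotMonth then true else yearFirst
      (dayFirst, yearFirst, true, gotMonth, gotDay)
  else if PySem.Chars.lowerChar c = 'm' then
    if gotMonth then st
    else
      let dayFirst := if !gotDay then false else dayFirst
      (dayFirst, yearFirst, gotYear, true, gotDay)
  else if PySem.Chars.lowerChar c = 'd' then
    if gotDay then st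
    else
      let dayFirst := if !gotMonth then true else dayFirst
      (dayFirst, yearFirst, gotYear, gotMonth, true)
  else st

def getDayFirstAndYearFirst_py (formatstr : Option String) : Bool × Bool :=
  let fs := match formatstr with | none => "" | some s => s
  let st := fs.toList.foldl pvStepA (false, false, false, false, false)
  (st.1, st.2.1)

-- ===== PORT B =====
def getDayFirstAndYearFirst_py_alt (formatstr : Option String) : Bool × Bool :=
  let s := PySem.Str.lower (match formatstr with | none => "" | some t => t)
  let py := PySem.Str.find s "y"
  let pm := PySem.Str.find s "m"
  let pd := PySem.Str.find s "d"
  let yearFirst := !(py == -1) && ((pm == -1) || decide (py < pm)) && ((pd == -1) || decide (py < pd))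
  let dayFirst := !(pd == -1) && ((pm == -1) || decide (pd < pm))
  (dayFirst, yearFirst)

-- ===== PRECONDITION & SPEC =====
def Spec_getDayFirstAndYearFirst_py (formatstr : Option String) (out : Bool × Bool) : Prop := out = getDayFirstAndYearFirst_py_alt formatstr
instance (formatstr : Option String) (out : Bool × Bool) : Decidable (Spec_getDayFirstAndYearFirst_py formatstr out) := by unfold Spec_getDayFirstAndYearFirst_py; infer_instance

-- ===== CLAIM (what is proved, stated in full; the proofs are below) =====
def Claim_equal_getDayFirstAndYearFirst_py : Prop := ∀ (formatstr : Option String), Dom_getDayFirstAndYearFirst_py formatstr → Spec_getDayFirstAndYearFirst_py formatstr (getDayFirstAndYearFirst_py formatstr)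

-- ===== LEMMAS AND PROOFS =====

-- first index of char c in l, -1 if absent (matches Python str.find for a 1-char needle)
def fIdx (c : Char) : List Char → Int
  | [] => -1
  | a :: r => if a = c then 0 else (if fIdx c r = -1 then -1 else fIdx c r + 1)

-- spec-level answers over the RAW char list (lowering each char as A does)
def dmd : List Char → Bool
  | [] => false
  | c :: r => if PySem.Chars.lowerChar c = 'y' then dmd r
      else if PySem.Chars.lowerChar c = 'm' then false
      else if PySem.Chars.lowerChar c = 'd' then true
      else dmd r

def ymd : List Char → Bool
  | [] => false
  | c :: r => if PySem.Chars.lowerChar c = 'y' then true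
      else if PySem.Chars.lowerChar c = 'm' then false
      else if PySem.Chars.lowerChar c = 'd' then false
      else ymd r

theorem fIdx_ge (c : Char) (l : List Char) : -1 ≤ fIdx c l := by
  induction l with
  | nil => simp [fIdx]
  | cons a r ih => simp only [fIdx]; split_ifs <;> omega

-- A-side: once gotMonth or gotDay is set, dayFirst and yearFirst never change again
theorem loopA_freeze (l : List Char) : ∀ dF yF gY gM gD, (gM || gD) = true →
    (l.foldl pvStepA (dF, yF, gY, gM, gD)).1 = dF ∧ (l.foldl pvStepA (dF, yF, gY, gM, gD)).2.1 = yF := by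
  induction l with
  | nil => intro _ _ _ _ _ _; exact ⟨rfl, rfl⟩
  | cons a r ih =>
      intro dF yF gY gM gD h
      simp only [List.foldl_cons, pvStepA]
      split_ifs <;>
        first
          | exact ih _ _ _ _ _ h
          | exact ih _ _ _ _ _ (by simp)
          | (cases gM <;> cases gD <;> simp_all)

-- A-side: after a leading 'y', only the day/month race remains
theorem loopA_afterY (l : List Char) : ∀ yF,
    (l.foldl pvStepA (false, yF, true, false, false)).1 = dmd l ∧
    (l.foldl pvStepA (false, yF, true, false, false)).2.1 = yF := by
  induction l with
  | nil => intro _; exact ⟨rfl, rfl⟩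
  | cons a r ih =>
      intro yF
      simp only [List.foldl_cons, pvStepA, dmd]
      split_ifs
      all_goals try contradiction
      all_goals try exact ih yF
      all_goals try exact loopA_freeze r _ _ _ _ _ (by simp)

-- A-side main characterisation
theorem loopA_main (l : List Char) :
    (l.foldl pvStepA (false, false, false, false, false)).1 = dmd l ∧
    (l.foldl pvStepA (false, false, false, false, false)).2.1 = ymd l := by
  induction l with
  | nil => exact ⟨rfl, rfl⟩
  | cons a r ih =>
      simp only [List.foldl_cons, pvStepA, dmd, ymd]
      split_ifs
      all_goals try contradiction
      all_goals try exact ih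
      all_goals try exact loopA_afterY r true
      all_goals try exact loopA_freeze r _ _ _ _ _ (by simp)

-- singleton-needle prefix: [c] is a prefix of t iff t starts with c
theorem singleton_prefix_iff (c : Char) (t : List Char) : [c] <+: t ↔ t.head? = some c := by
  cases t with
  | nil => simp
  | cons a r => simp [List.cons_prefix_cons]; exact eq_comm

theorem fIdx_not_mem (c : Char) (l : List Char) (h : c ∉ l) : fIdx c l = -1 := by
  induction l with
  | nil => rfl
  | cons a r ih =>
      simp only [fIdx]
      rw [if_neg (by intro hh; exact h (hh ▸ List.mem_cons_self)), ih (fun hm => h (List.mem_cons_of_mem _ hm))]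
      simp

theorem fIdx_spec (c : Char) (l : List Char) (h : c ∈ l) :
    0 ≤ fIdx c l ∧ l[(fIdx c l).toNat]? = some c ∧ ∀ i < (fIdx c l).toNat, l[i]? ≠ some c := by
  induction l with
  | nil => simp at h
  | cons a r ih =>
      by_cases ha : a = c
      · refine ⟨by simp [fIdx, ha], by simp [fIdx, ha], ?_⟩
        intro i hi
        simp [fIdx, ha] at hi
      · have hr : c ∈ r := by rcases List.mem_cons.mp h with h' | h'; exact absurd h'.symm ha; exact h'
        obtain ⟨h0, hget, hmin⟩ := ih hr
        refine ⟨?_, ?_, ?_⟩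
        · simp only [fIdx, if_neg ha]
          split_ifs with hh
          · omega
          · omega
        · simp only [fIdx, if_neg ha]
          split_ifs with hh
          · exact absurd hh (by omega)
          · have : (fIdx c r + 1).toNat = (fIdx c r).toNat + 1 := by omega
            rw [this]
            simpa using hget
        · intro i hi
          simp only [fIdx, if_neg ha] at hi ⊢
          split_ifs at hi with hh
          · omega
          · have ht : (fIdx c r + 1).toNat = (fIdx c r).toNat + 1 := by omega
            rw [ht] at hi
            cases i with
            | zero => simp; exact fun hh' => ha hh'
            | succ j =>
                simp only [List.getElem?_cons_succ]
                exact hmin j (by omega)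

theorem find_singleton (c : Char) (l : List Char) : PySem.Chars.find l [c] = fIdx c l := by
  by_cases hc : c ∈ l
  · obtain ⟨h0, hget, hmin⟩ := fIdx_spec c l hc
    have hpre : [c] <+: l.drop (fIdx c l).toNat := by
      rw [singleton_prefix_iff, List.head?_drop]
      exact hget
    have hinf : [c] <:+: l :=
      (PySem.Chars.isIn_iff_infix _ _).mp ((PySem.Chars.exists_prefix_drop_iff_isIn _ _).mp ⟨_, hpre⟩)
    have h0' : 0 ≤ PySem.Chars.find l [c] := (PySem.Chars.find_nonneg_iff _ _).mpr hinf
    obtain ⟨hpref, hminf⟩ := PySem.Chars.find_spec h0'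
    have hgetf : l[(PySem.Chars.find l [c]).toNat]? = some c := by
      rw [← List.head?_drop, ← singleton_prefix_iff]
      exact hpref
    rcases Nat.lt_trichotomy (PySem.Chars.find l [c]).toNat (fIdx c l).toNat with hlt | heq | hgt
    · exact absurd hgetf (hmin _ hlt)
    · omega
    · exact absurd hpre (hminf _ hgt)
  · rw [fIdx_not_mem c l hc]
    exact (PySem.Chars.find_eq_neg_one_iff _ _).mpr
      (fun hinf => hc (hinf.subset (List.mem_singleton_self c)))

-- B-side: the position formulas over the LOWERED list compute dmd / ymd of the raw list
theorem dayB_map (l : List Char) :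
    (!(fIdx 'd' (l.map PySem.Chars.lowerChar) == -1) &&
      ((fIdx 'm' (l.map PySem.Chars.lowerChar) == -1) || decide (fIdx 'd' (l.map PySem.Chars.lowerChar) < fIdx 'm' (l.map PySem.Chars.lowerChar)))) = dmd l := by
  induction l with
  | nil => rfl
  | cons a r ih =>
      have hge_d := fIdx_ge 'd' (r.map PySem.Chars.lowerChar)
      have hge_m := fIdx_ge 'm' (r.map PySem.Chars.lowerChar)
      simp only [List.map_cons, dmd, fIdx]
      by_cases hd : PySem.Chars.lowerChar a = 'd' <;> by_cases hm : PySem.Chars.lowerChar a = 'm' <;>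
        by_cases hy : PySem.Chars.lowerChar a = 'y'
      · exact absurd (hd.symm.trans hm) (by decide)
      · exact absurd (hd.symm.trans hm) (by decide)
      · exact absurd (hd.symm.trans hy) (by decide)
      · rw [Bool.eq_iff_iff]
        simp [hd]
        omega
      · exact absurd (hm.symm.trans hy) (by decide)
      · rw [Bool.eq_iff_iff]
        simp [hm]
        omega
      · rw [← ih, Bool.eq_iff_iff]
        simp [hy]
        omega
      · rw [← ih, Bool.eq_iff_iff]
        simp [hd, hm, hy]
        omega

theorem yearB_map (l : List Char) :
    (!(fIdx 'y' (l.map PySem.Chars.lowerChar) == -1) &&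
      ((fIdx 'm' (l.map PySem.Chars.lowerChar) == -1) || decide (fIdx 'y' (l.map PySem.Chars.lowerChar) < fIdx 'm' (l.map PySem.Chars.lowerChar))) &&
      ((fIdx 'd' (l.map PySem.Chars.lowerChar) == -1) || decide (fIdx 'y' (l.map PySem.Chars.lowerChar) < fIdx 'd' (l.map PySem.Chars.lowerChar)))) = ymd l := by
  induction l with
  | nil => rfl
  | cons a r ih =>
      have hge_d := fIdx_ge 'd' (r.map PySem.Chars.lowerChar)
      have hge_m := fIdx_ge 'm' (r.map PySem.Chars.lowerChar)
      have hge_y := fIdx_ge 'y' (r.map PySem.Chars.lowerChar)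
      simp only [List.map_cons, ymd, fIdx]
      by_cases hd : PySem.Chars.lowerChar a = 'd' <;> by_cases hm : PySem.Chars.lowerChar a = 'm' <;>
        by_cases hy : PySem.Chars.lowerChar a = 'y'
      · exact absurd (hd.symm.trans hm) (by decide)
      · exact absurd (hd.symm.trans hm) (by decide)
      · exact absurd (hd.symm.trans hy) (by decide)
      · rw [Bool.eq_iff_iff]
        simp [hd]
        omega
      · exact absurd (hm.symm.trans hy) (by decide)
      · rw [Bool.eq_iff_iff]
        simp [hm]
        omega
      · rw [Bool.eq_iff_iff]
        simp [hy]
        omega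
      · rw [← ih, Bool.eq_iff_iff]
        simp [hd, hm, hy]
        omega

-- ===== VERDICT (by name: the statement is the Claim_ definition above) =====
theorem getDayFirstAndYearFirst_py_spec : Claim_equal_getDayFirstAndYearFirst_py := by
  intro formatstr _
  unfold Spec_getDayFirstAndYearFirst_py getDayFirstAndYearFirst_py getDayFirstAndYearFirst_py_alt
  cases formatstr with
  | none => decide
  | some s =>
      have hA := loopA_main s.toList
      have hlow : (PySem.Str.lower s).toList = s.toList.map PySem.Chars.lowerChar := by
        simp [PySem.Chars.lower]
      have hy : PySem.Str.find (PySem.Str.lower s) "y" = fIdx 'y' (s.toList.map PySem.Chars.lowerChar) := by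
        simp only [PySem.Str.find_eq, hlow]
        exact find_singleton 'y' _
      have hm : PySem.Str.find (PySem.Str.lower s) "m" = fIdx 'm' (s.toList.map PySem.Chars.lowerChar) := by
        simp only [PySem.Str.find_eq, hlow]
        exact find_singleton 'm' _
      have hd : PySem.Str.find (PySem.Str.lower s) "d" = fIdx 'd' (s.toList.map PySem.Chars.lowerChar) := by
        simp only [PySem.Str.find_eq, hlow]
        exact find_singleton 'd' _
      simp only [hy, hm, hd, Prod.mk.injEq]
      exact ⟨hA.1.trans (dayB_map s.toList).symm, hA.2.trans (yearB_map s.toList).symm⟩
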